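-- pv_equiv track=rewrite | github.com/chessrajat/competitive_programming | other/username_changes.py | possibleChanges
-- ===== SOURCE A (Python) =====
-- def possibleChanges(usernames):
--     # Write your code here
--     result = []
--
--     for username in usernames:
--         flag = False
--         for i in range(len(username)-1):
--             if username[i] <= username[i+1]:
--                 continue
--             else:
--                 result.append("YES")
--                 flag = True
--                 break
--         if not flag:
--             result.append("NO")
--     return result
-- ===== SOURCE B (Python) =====
-- def possibleChanges(usernames):
--     return ["NO" if "".join(sorted(u)) == u else "YES" for u in usernames]
-- ===== Notes on version B (the rewrite author's own statement) =====
-- stated objective: simpler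
-- what changed: Replaces the explicit adjacent-pair index scan with early break by a sort-then-compare one-liner: a string is already non-decreasing iff it equals its sorted copy.
import Mathlib
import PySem

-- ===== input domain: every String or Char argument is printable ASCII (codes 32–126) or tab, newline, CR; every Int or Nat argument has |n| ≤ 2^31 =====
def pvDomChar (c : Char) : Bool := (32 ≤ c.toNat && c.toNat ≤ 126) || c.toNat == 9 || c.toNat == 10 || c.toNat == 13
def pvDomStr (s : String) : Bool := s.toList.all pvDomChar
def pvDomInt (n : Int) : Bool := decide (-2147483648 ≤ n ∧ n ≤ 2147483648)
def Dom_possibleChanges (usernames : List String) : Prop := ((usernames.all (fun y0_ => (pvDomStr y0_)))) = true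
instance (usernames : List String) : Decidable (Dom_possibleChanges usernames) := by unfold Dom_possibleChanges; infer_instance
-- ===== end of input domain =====

-- B replaces A's adjacent-pair index scan (with early break) by a sort-then-compare
-- per username; objective: simpler.

-- ===== PORT A =====
-- inner loop 'for i in range(len(username)-1): … break': returns true iff it appended "YES"
def pvScanA (s : List Char) (i : Nat) : Bool :=
  if _h : i < s.length - 1 then
    if s[i]! ≤ s[i+1]! then pvScanA s (i+1) else true
  else false
termination_by s.length - 1 - i
decreasing_by omega

def possibleChanges (usernames : List String) : List String :=
  usernames.foldl (fun result username =>
    if pvScanA username.toList 0 then result ++ ["YES"] else result ++ ["NO"]) []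

-- ===== PORT B =====
def possibleChanges_alt (usernames : List String) : List String :=
  usernames.map (fun u =>
    if PySem.List.sorted u.toList (fun c => c) false = u.toList then "NO" else "YES")

-- ===== PRECONDITION & SPEC =====
def Spec_possibleChanges (usernames : List String) (out : List String) : Prop := out = possibleChanges_alt usernames
instance (usernames : List String) (out : List String) : Decidable (Spec_possibleChanges usernames out) := by unfold Spec_possibleChanges; infer_instance

-- ===== CLAIM (what is proved, stated in full; the proofs are below) =====
def Claim_equal_possibleChanges : Prop := ∀ (usernames : List String), Dom_possibleChanges usernames → Spec_possibleChanges usernames (possibleChanges usernames)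

-- ===== LEMMAS AND PROOFS =====

-- pvScanA s i = false iff every adjacent pair from index i on is in order
theorem pvScanA_false_iff (s : List Char) (i : Nat) :
    pvScanA s i = false ↔ (∀ j, i ≤ j → j + 1 < s.length → s[j]! ≤ s[j+1]!) := by
  induction i using (pvScanA.induct s) with
  | case1 i h hle ih =>
    rw [pvScanA, dif_pos h, if_pos hle]
    constructor
    · intro hf j hij hj
      rcases Nat.eq_or_lt_of_le hij with rfl | hlt
      · exact hle
      · exact (ih.mp hf) j hlt hj
    · intro hall
      exact ih.mpr (fun j hij hj => hall j (Nat.le_of_succ_le hij) hj)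
  | case2 i h hgt =>
    rw [pvScanA, dif_pos h, if_neg hgt]
    simp only [Bool.true_eq_false, false_iff]
    intro hall
    exact hgt (hall i le_rfl (by omega))
  | case3 i h =>
    rw [pvScanA, dif_neg h]
    simp only [true_iff]
    intro j hij hj
    omega

theorem pvScanA_false_iff_chain (s : List Char) :
    pvScanA s 0 = false ↔ List.IsChain (· ≤ ·) s := by
  rw [pvScanA_false_iff, List.isChain_iff_getElem]
  constructor
  · intro h i hi
    have h1 : i < s.length := by omega
    have := h i (Nat.zero_le i) hi
    simpa [getElem!_pos s i h1, getElem!_pos s (i+1) hi] using this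
  · intro h j _ hj
    have h1 : j < s.length := by omega
    have := h j hj
    simpa [getElem!_pos s j h1, getElem!_pos s (j+1) hj] using this

theorem pvScanA_false_iff_sorted (s : List Char) :
    pvScanA s 0 = false ↔ PySem.List.sorted s (fun c => c) false = s := by
  rw [pvScanA_false_iff_chain]
  constructor
  · intro h
    have hp : List.Pairwise (fun a b : Char => a ≤ b) s := List.isChain_iff_pairwise.mp h
    exact PySem.List.sorted_eq_self_of_pairwise s (fun c => c) hp
  · intro h
    have hp : List.Pairwise (fun a b : Char => a ≤ b) s := by
      have := PySem.List.sorted_pairwise s (fun c => c)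
      rwa [h] at this
    exact List.isChain_iff_pairwise.mpr hp

theorem possibleChanges_foldl_map (usernames : List String) (acc : List String) :
    usernames.foldl (fun result username =>
      if pvScanA username.toList 0 then result ++ ["YES"] else result ++ ["NO"]) acc
    = acc ++ usernames.map (fun u => if pvScanA u.toList 0 then "YES" else "NO") := by
  induction usernames generalizing acc with
  | nil => simp
  | cons u us ih =>
    simp only [List.foldl_cons, List.map_cons]
    rw [ih]
    by_cases h : pvScanA u.toList 0 = true <;> simp [h]

-- ===== VERDICT (by name: the statement is the Claim_ definition above) =====
theorem possibleChanges_spec : Claim_equal_possibleChanges := by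
  intro usernames _
  show possibleChanges usernames = possibleChanges_alt usernames
  rw [possibleChanges, possibleChanges_foldl_map, List.nil_append,
    possibleChanges_alt]
  apply List.map_congr_left
  intro u _
  by_cases h : pvScanA u.toList 0 = false
  · rw [if_neg (by simp [h]), if_pos ((pvScanA_false_iff_sorted _).mp h)]
  · rw [if_pos (by simpa using h),
      if_neg (fun hs => h ((pvScanA_false_iff_sorted _).mpr hs))]
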